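-- pv_equiv track=rewrite | github.com/EnguerrandPrebet/DBDM_Project_2 | plop.py | func
-- ===== SOURCE A (Python) =====
-- def func(data, dates):
--     if(type(data[0]) != tuple):
--         data.sort()
--         data = [(d,1) for d in data]
--     else:
--         data.sort(key = lambda x:x[0])
--     output = [0]*(len(dates))
--     x = 0
--     i = 0
--     t = 0
--     while (i < len(data) and t < len(dates)):
--         if(data[i][0] < dates[t]):
--             x += data[i][1]
--             i += 1
--         else:
--             output[t] = x
--             x = 0
--             t += 1
--     if(t == len(dates)):
--         raise('Des objectifs ont eu lieu après le dernier temps: ' +str(data) + ' ' + str(dates))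
--
--     while(t < len(dates)):
--         output[t] = x
--         x = 0
--         t += 1
--     return output
-- ===== SOURCE B (Python) =====
-- # Sorted data + prefix sums: each answer is a difference of two prefix sums at
-- # binary-searched positions, instead of walking the data element by element.
-- # Mutates `data` in place by sorting it, like the original.
-- def _lower_bound(values, d, lo, hi):
--     # first index in [lo, hi) whose value is >= d (values sorted ascending)
--     while lo < hi:
--         mid = (lo + hi) // 2
--         if values[mid] < d:
--             lo = mid + 1
--         else:
--             hi = mid
--     return lo
--
-- def func(data, dates):
--     if type(data[0]) != tuple:
--         data.sort()
--         data = [(d, 1) for d in data]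
--     else:
--         data.sort(key=lambda x: x[0])
--     values = [v for v, _ in data]
--     prefix = [0]
--     for _, w in data:
--         prefix.append(prefix[-1] + w)
--     out = []
--     i = 0
--     for d in dates:
--         j = _lower_bound(values, d, i, len(values))
--         out.append(prefix[j] - prefix[i])
--         i = j
--     if not dates or i < len(data):
--         raise ValueError('Des objectifs ont eu lieu après le dernier temps: '
--                          + str(data) + ' ' + str(dates))
--     return out
-- ===== Notes on version B (the rewrite author's own statement) =====
-- stated objective: alternative
-- what changed: A walks the sorted data element by element with an accumulator that it resets at each date; B precomputes prefix sums of the weights and answers each date by a binary search for its position, outputting a difference of two prefix sums; Pre_ excludes exactly the inputs on which A raises (empty data, or no date strictly after every data point, including empty dates).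
import Mathlib
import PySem

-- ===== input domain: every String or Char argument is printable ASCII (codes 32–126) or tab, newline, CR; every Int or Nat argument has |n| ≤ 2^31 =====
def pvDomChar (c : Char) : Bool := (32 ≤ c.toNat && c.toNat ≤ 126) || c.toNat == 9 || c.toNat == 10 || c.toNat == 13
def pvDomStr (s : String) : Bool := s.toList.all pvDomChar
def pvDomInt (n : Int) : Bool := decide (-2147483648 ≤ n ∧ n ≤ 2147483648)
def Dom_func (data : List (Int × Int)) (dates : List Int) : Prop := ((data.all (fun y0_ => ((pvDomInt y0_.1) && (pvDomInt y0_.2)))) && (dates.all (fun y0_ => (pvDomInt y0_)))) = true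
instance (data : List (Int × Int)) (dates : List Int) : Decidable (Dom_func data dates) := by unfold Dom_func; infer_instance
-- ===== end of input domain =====

-- B replaces A's element-by-element walk with a resetting accumulator by prefix sums
-- of the weights and one binary search per date; return-value equivalence (both
-- Pythons also sort `data` in place).

-- ===== PORT A =====
-- A's `type(data[0]) != tuple` branch never fires for well-typed (Int × Int) input
-- (and raises IndexError on empty data, which Pre_ excludes), so the port starts at
-- data.sort(key=lambda x: x[0]).
-- The while loops, transliterated on the suffixes of data/dates (i/t are the dropped
-- prefixes' lengths, x the accumulator); when t reaches len(dates) with data left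
-- (or dates == []) Python A raises — the port returns [] there, outside Pre_.
def funcLoop : List (Int × Int) → List Int → Int → List Int
  | _, [], _ => []                                   -- t == len(dates): A raises
  | [], _d :: rt, x => x :: List.replicate rt.length 0   -- i == len(data): second while fills x then 0s
  | (v, w) :: rd, d :: rt, x =>
      if v < d then funcLoop rd (d :: rt) (x + w)    -- data[i][0] < dates[t]: x += w; i += 1
      else x :: funcLoop ((v, w) :: rd) rt 0         -- output[t] = x; x = 0; t += 1
  termination_by rd rt _ => rd.length + rt.length

def func (data : List (Int × Int)) (dates : List Int) : List Int :=
  funcLoop (PySem.List.sorted data (fun p => p.1) false) dates 0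

-- ===== PORT B =====
-- _lower_bound(values, d, lo, hi): first index in [lo, hi) with values[index] >= d
def lowerBound (values : List Int) (d : Int) (lo hi : Nat) : Nat :=
  if h : lo < hi then
    let mid := (lo + hi) / 2
    if values.getD mid 0 < d then lowerBound values d (mid + 1) hi
    else lowerBound values d lo mid
  else lo
  termination_by hi - lo
  decreasing_by all_goals omega

-- prefix = [0]; for _, w in data: prefix.append(prefix[-1] + w)
def prefixSums : Int → List (Int × Int) → List Int
  | a, [] => [a]
  | a, (_, w) :: rest => a :: prefixSums (a + w) rest

-- one iteration of B's for-loop over dates, state (out, i)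
def stepB (values : List Int) (pre : List Int) (st : List Int × Nat) (d : Int) :
    List Int × Nat :=
  let (out, i) := st
  let j := lowerBound values d i values.length
  (out ++ [pre.getD j 0 - pre.getD i 0], j)

def func_alt (data : List (Int × Int)) (dates : List Int) : List Int :=
  let s := PySem.List.sorted data (fun p => p.1) false
  let values := s.map Prod.fst
  let pre := prefixSums 0 s
  let r := dates.foldl (stepB values pre) ([], 0)
  if dates = [] || decide (r.2 < s.length) then []   -- B's explicit raise, outside Pre_
  else r.1

-- ===== PRECONDITION & SPEC =====
-- Pre_ excludes exactly the inputs on which Python A raises: empty data (IndexError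
-- from data[0]) and inputs where no date strictly exceeds every data value, including
-- empty dates (the explicit raise when t == len(dates)). B raises on those too.
def Pre_func (data : List (Int × Int)) (dates : List Int) : Prop :=
  data ≠ [] ∧ ∃ d ∈ dates, ∀ p ∈ data, p.1 < d
instance (data : List (Int × Int)) (dates : List Int) : Decidable (Pre_func data dates) := by
  unfold Pre_func; infer_instance

def pvWitness_func : (List (Int × Int)) × List Int := ([(1, 2), (0, 1)], [1, 5])

def Spec_func (data : List (Int × Int)) (dates : List Int) (out : List Int) : Prop := out = func_alt data dates
instance (data : List (Int × Int)) (dates : List Int) (out : List Int) : Decidable (Spec_func data dates out) := by unfold Spec_func; infer_instance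

-- ===== CLAIM (what is proved, stated in full; the proofs are below) =====
def Claim_equal_func : Prop := ∀ (data : List (Int × Int)) (dates : List Int), Dom_func data dates → Pre_func data dates → Spec_func data dates (func data dates)

-- ===== LEMMAS AND PROOFS =====

-- boundary of values strictly below d in a sorted list
def bnd (values : List Int) (d : Int) : Nat :=
  (values.takeWhile (fun v => decide (v < d))).length

theorem bnd_le (values : List Int) (d : Int) : bnd values d ≤ values.length :=
  (List.takeWhile_prefix _).length_le

-- characterization of bnd on a sorted list
theorem bnd_spec (values : List Int) (d : Int)
    (hsort : values.Pairwise (· ≤ ·)) :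
    ∀ k (h : k < values.length), (values[k] < d ↔ k < bnd values d) := by
  induction values with
  | nil => intro k h; simp at h
  | cons a l ih =>
      obtain ⟨hhd, hl⟩ := List.pairwise_cons.mp hsort
      intro k h
      by_cases ha : a < d
      · have hb : bnd (a :: l) d = (bnd l d) + 1 := by
          unfold bnd
          simp [ha]
        cases k with
        | zero => simpa [hb] using ha
        | succ k =>
            have := ih hl k (by simpa using h)
            simpa [hb] using this
      · have hb : bnd (a :: l) d = 0 := by
          unfold bnd
          simp [ha]
        rw [hb]
        cases k with
        | zero => simpa using ha
        | succ k =>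
            have hklen : k < l.length := by simpa using h
            have hk : l[k]'hklen < d → False := by
              intro hlt
              exact ha (lt_of_le_of_lt (hhd (l[k]'hklen) (List.getElem_mem _)) hlt)
            simp only [List.getElem_cons_succ]
            constructor
            · intro hlt; exact absurd hlt hk
            · omega

theorem lowerBound_eq_max (values : List Int) (d : Int)
    (hsort : values.Pairwise (· ≤ ·)) :
    ∀ (n lo hi : Nat), hi - lo ≤ n → lo ≤ hi → hi ≤ values.length →
      max lo (bnd values d) ≤ hi →
      lowerBound values d lo hi = max lo (bnd values d) := by
  intro n
  induction n with
  | zero =>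
      intro lo hi hn hlohi hlen hmax
      rw [lowerBound, dif_neg (by omega)]
      omega
  | succ n ih =>
      intro lo hi hn hlohi hlen hmax
      by_cases h : lo < hi
      · rw [lowerBound, dif_pos h]
        have hmidlt : (lo + hi) / 2 < values.length := by omega
        have hget : values.getD ((lo + hi) / 2) 0 = values[(lo + hi) / 2] :=
          List.getD_eq_getElem _ _ hmidlt
        have hspec := bnd_spec values d hsort ((lo + hi) / 2) hmidlt
        by_cases hc : values.getD ((lo + hi) / 2) 0 < d
        · rw [if_pos hc]
          have hblt : (lo + hi) / 2 < bnd values d := hspec.mp (by rwa [hget] at hc)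
          have heq : max ((lo + hi) / 2 + 1) (bnd values d) = max lo (bnd values d) := by
            omega
          rw [ih ((lo + hi) / 2 + 1) hi (by omega) (by omega) hlen (by omega), heq]
        · rw [if_neg hc]
          have hble : bnd values d ≤ (lo + hi) / 2 := by
            by_contra hb
            exact hc (by rw [hget]; exact hspec.mpr (by omega))
          exact ih lo ((lo + hi) / 2) (by omega) (by omega) (by omega) (by omega)
      · rw [lowerBound, dif_neg h]; omega

-- prefix sums indexed by getD
theorem prefixSums_getD (s : List (Int × Int)) (a : Int) :
    ∀ k, k ≤ s.length → (prefixSums a s).getD k 0 = a + ((s.take k).map Prod.snd).sum := by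
  induction s generalizing a with
  | nil =>
      intro k hk
      have : k = 0 := by simpa using hk
      subst this
      simp [prefixSums]
  | cons p rest ih =>
      obtain ⟨v, w⟩ := p
      intro k hk
      cases k with
      | zero => simp [prefixSums]
      | succ k =>
          have := ih (a + w) k (by simpa using hk)
          simp only [prefixSums, List.getD_cons_succ, List.take_succ_cons,
            List.map_cons, List.sum_cons, this]
          ring

-- A's one-date step (x accumulates the weights below d, suffix is dropWhile)
theorem funcLoop_nil (rt : List Int) : funcLoop [] rt 0 = List.replicate rt.length 0 := by
  cases rt <;> simp [funcLoop, List.replicate]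

theorem funcLoop_cons (s : List (Int × Int)) (d : Int) (rt : List Int) (x : Int) :
    funcLoop s (d :: rt) x =
      (x + ((s.takeWhile (fun p => decide (p.1 < d))).map Prod.snd).sum)
        :: funcLoop (s.dropWhile (fun p => decide (p.1 < d))) rt 0 := by
  induction s generalizing x with
  | nil => simp [funcLoop, funcLoop_nil]
  | cons p s ih =>
      obtain ⟨v, w⟩ := p
      by_cases h : v < d
      · rw [show funcLoop ((v, w) :: s) (d :: rt) x = funcLoop s (d :: rt) (x + w) by
          simp [funcLoop, h]]
        rw [ih]
        rw [List.takeWhile_cons_of_pos (by simpa using h),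
            List.dropWhile_cons_of_pos (by simpa using h)]
        simp only [List.map_cons, List.sum_cons]
        congr 1
        ring
      · rw [show funcLoop ((v, w) :: s) (d :: rt) x
            = x :: funcLoop ((v, w) :: s) rt 0 by simp [funcLoop, h]]
        rw [List.takeWhile_cons_of_neg (by simpa using h),
            List.dropWhile_cons_of_neg (by simpa using h)]
        simp

-- clean recursive form of B's fold (pointer j into the sorted data)
def gB (values : List Int) (pre : List Int) : List Int → Nat → List Int
  | [], _ => []
  | d :: rt, i =>
      let j := lowerBound values d i values.length
      (pre.getD j 0 - pre.getD i 0) :: gB values pre rt j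

theorem foldB_eq_gB (values pre : List Int) (rt : List Int) (out : List Int) (i : Nat) :
    (rt.foldl (stepB values pre) (out, i)).1 = out ++ gB values pre rt i := by
  induction rt generalizing out i with
  | nil => simp [gB]
  | cons d rt ih =>
      simp only [List.foldl_cons, stepB, gB]
      rw [ih, List.append_assoc, List.singleton_append]

theorem foldB_snd (values pre : List Int) (rt : List Int) (out : List Int) (i : Nat) :
    (rt.foldl (stepB values pre) (out, i)).2
      = rt.foldl (fun i d => lowerBound values d i values.length) i := by
  induction rt generalizing out i with
  | nil => rfl
  | cons d rt ih => simp only [List.foldl_cons, stepB]; exact ih ..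

-- generic: a predicate that holds exactly on the first n positions pins the takeWhile length
theorem takeWhile_length_of_spec (p : Int → Bool) :
    ∀ (l : List Int) (n : Nat), n ≤ l.length →
      (∀ k (h : k < l.length), (p l[k] = true ↔ k < n)) →
      (l.takeWhile p).length = n := by
  intro l
  induction l with
  | nil =>
      intro n hn _
      simp at hn
      simp [hn]
  | cons a l ih =>
      intro n hn hspec
      by_cases ha : p a = true
      · have h0 : 0 < n := (hspec 0 (by simp)).mp ha
        have : (l.takeWhile p).length = n - 1 := by
          refine ih (n - 1) (by simp at hn ⊢; omega) ?_
          intro k hk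
          have := hspec (k + 1) (by simpa using hk)
          simp only [List.getElem_cons_succ] at this
          rw [this]
          omega
        simp only [List.takeWhile_cons, ha, if_true, List.length_cons, this]
        omega
      · have h0 : n = 0 := by
          have := hspec 0 (by simp)
          simp only [List.getElem_cons_zero] at this
          by_contra hne
          exact ha (this.mpr (by omega))
        simp [ha, h0]

theorem dropWhile_eq_drop (p : (Int × Int) → Bool) (l : List (Int × Int)) :
    l.dropWhile p = l.drop (l.takeWhile p).length := by
  induction l with
  | nil => rfl
  | cons a l ih => by_cases h : p a <;> simp [h, ih]

theorem take_takeWhile_length (p : (Int × Int) → Bool) (l : List (Int × Int)) :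
    l.take (l.takeWhile p).length = l.takeWhile p :=
  (List.prefix_iff_eq_take.mp (List.takeWhile_prefix p)).symm

-- the segment A consumes for date d is exactly B's pointer advance
theorem segment_length (s : List (Int × Int)) (d : Int) (i : Nat)
    (hsort : (s.map Prod.fst).Pairwise (· ≤ ·)) (hi : i ≤ s.length) :
    ((s.drop i).takeWhile (fun p => decide (p.1 < d))).length
      = max i (bnd (s.map Prod.fst) d) - i := by
  have hlen : (s.map Prod.fst).length = s.length := List.length_map ..
  have hb := bnd_le (s.map Prod.fst) d
  have hmap : ((s.drop i).takeWhile (fun p => decide (p.1 < d))).length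
      = (((s.map Prod.fst).drop i).takeWhile (fun v => decide (v < d))).length := by
    rw [← List.map_drop, List.takeWhile_map, List.length_map]
    rfl
  rw [hmap]
  refine takeWhile_length_of_spec _ ((s.map Prod.fst).drop i) _ (by simp [hlen]; omega) ?_
  intro k hk
  have hk2 : i + k < (s.map Prod.fst).length := by simp at hk; omega
  have hge : ((s.map Prod.fst).drop i)[k] = (s.map Prod.fst)[i + k] := List.getElem_drop ..
  rw [hge]
  have := bnd_spec (s.map Prod.fst) d hsort (i + k) hk2
  simp only [decide_eq_true_eq]
  omega

-- main invariant: A's loop on the unconsumed suffix s.drop i equals B's loop at pointer i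
theorem loop_eq_gB (s : List (Int × Int))
    (hsort : (s.map Prod.fst).Pairwise (· ≤ ·)) :
    ∀ (rt : List Int) (i : Nat), i ≤ s.length →
      funcLoop (s.drop i) rt 0 = gB (s.map Prod.fst) (prefixSums 0 s) rt i := by
  intro rt
  induction rt with
  | nil => intro i _; cases h : s.drop i <;> simp [funcLoop, gB]
  | cons d rt ih =>
      intro i hi
      have hlenv : (s.map Prod.fst).length = s.length := List.length_map ..
      have hble := bnd_le (s.map Prod.fst) d
      have hseg := segment_length s d i hsort hi
      set t := ((s.drop i).takeWhile (fun p => decide (p.1 < d))).length with ht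
      have htle : t ≤ s.length - i := by
        have h1 := (List.takeWhile_prefix (l := s.drop i)
          (fun p => decide (p.1 < d))).length_le
        rw [← ht] at h1
        simp at h1
        omega
      have hj : lowerBound (s.map Prod.fst) d i (s.map Prod.fst).length = i + t := by
        rw [lowerBound_eq_max (s.map Prod.fst) d hsort (s.map Prod.fst).length i
          (s.map Prod.fst).length (by omega) (by omega) (le_refl _) (by omega)]
        omega
      rw [funcLoop_cons, gB]
      simp only [hj]
      congr 1
      · -- heads agree: prefix-sum difference = weight of the consumed segment
        have hgi := prefixSums_getD s 0 i hi
        have hgj := prefixSums_getD s 0 (i + t) (by omega)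
        rw [hgi, hgj, List.take_add, List.map_append, List.sum_append]
        have h2 : (s.drop i).take t = (s.drop i).takeWhile (fun p => decide (p.1 < d)) := by
          rw [ht]; exact take_takeWhile_length ..
        rw [h2]
        ring
      · -- tails agree: the rest of the data is s.drop (i + t)
        rw [dropWhile_eq_drop, ← ht, List.drop_drop]
        exact ih (i + t) (by omega)

-- once some date exceeds every value, the pointer ends at the length of the data
theorem ptr_stay (values : List Int) (hsort : values.Pairwise (· ≤ ·)) (rt : List Int) :
    rt.foldl (fun i d => lowerBound values d i values.length) values.length
      = values.length := by
  induction rt with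
  | nil => rfl
  | cons d rt ih =>
      simp only [List.foldl_cons]
      rw [lowerBound_eq_max values d hsort values.length values.length values.length
        (by omega) (le_refl _) (le_refl _) (by have := bnd_le values d; omega)]
      rw [Nat.max_eq_left (bnd_le values d)]
      exact ih

theorem ptr_final (values : List Int) (hsort : values.Pairwise (· ≤ ·)) :
    ∀ (rt : List Int) (i : Nat), i ≤ values.length →
      (∃ d ∈ rt, bnd values d = values.length) →
      rt.foldl (fun i d => lowerBound values d i values.length) i = values.length := by
  intro rt
  induction rt with
  | nil => intro i _ h; simp at h
  | cons d rt ih =>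
      intro i hi hex
      obtain ⟨d0, hd0, hbd0⟩ := hex
      simp only [List.foldl_cons]
      have hble := bnd_le values d
      have hj : lowerBound values d i values.length = max i (bnd values d) :=
        lowerBound_eq_max values d hsort values.length i values.length
          (by omega) hi (le_refl _) (by omega)
      rcases List.mem_cons.mp hd0 with heq | hmem
      · rw [heq] at hbd0
        have hmax : max i (bnd values d) = values.length := by rw [hbd0]; omega
        rw [hj, hmax]
        exact ptr_stay values hsort rt
      · rw [hj]
        exact ih (max i (bnd values d)) (by omega) ⟨d0, hmem, hbd0⟩

-- ===== VERDICT (by name: the statement is the Claim_ definition above) =====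
theorem func_spec : Claim_equal_func := by
  intro data dates _ hpre
  obtain ⟨hne, d, hd, hall⟩ := hpre
  unfold Spec_func func func_alt
  have hsortv : ((PySem.List.sorted data (fun p => p.1) false).map Prod.fst).Pairwise (· ≤ ·) :=
    PySem.List.sorted_map_key_pairwise data (fun p => p.1)
  have hlenv : ((PySem.List.sorted data (fun p => p.1) false).map Prod.fst).length
      = (PySem.List.sorted data (fun p => p.1) false).length := List.length_map ..
  have hdall : ∀ v ∈ (PySem.List.sorted data (fun p => p.1) false).map Prod.fst,
      (fun v => decide (v < d)) v = true := by
    intro v hvv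
    obtain ⟨p, hp, rfl⟩ := List.mem_map.mp hvv
    have hpd : p ∈ data := (PySem.List.sorted_perm data (fun p => p.1) false).mem_iff.mp hp
    simpa using hall p hpd
  have hbd : bnd ((PySem.List.sorted data (fun p => p.1) false).map Prod.fst) d
      = ((PySem.List.sorted data (fun p => p.1) false).map Prod.fst).length := by
    unfold bnd
    rw [List.takeWhile_eq_self_iff.mpr hdall]
  have hfinal : (dates.foldl (stepB ((PySem.List.sorted data (fun p => p.1) false).map Prod.fst)
        (prefixSums 0 (PySem.List.sorted data (fun p => p.1) false)) ) ([], 0)).2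
      = (PySem.List.sorted data (fun p => p.1) false).length := by
    rw [foldB_snd, ← hlenv]
    exact ptr_final _ hsortv dates 0 (by omega) ⟨d, hd, hbd⟩
  have hdne : dates ≠ [] := by rintro rfl; simp at hd
  rw [if_neg (by simp [hdne, hfinal])]
  rw [foldB_eq_gB, List.nil_append]
  have hmain := loop_eq_gB (PySem.List.sorted data (fun p => p.1) false) hsortv dates 0
    (by omega)
  simpa using hmain
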